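-- pv_equiv track=rewrite | github.com/sukraBhandari/Intro-to-Algorithms-Udacity | Lesson-1-A-Social-Network-Magic-Trick/Problem-Set-1/create_tour.py | create_tour
-- ===== SOURCE A (Python) =====
-- def create_tour(nodes):
--     # your code here
--     #print  [j for j in itertools.product(nodes,2)]
--     lists=[]
--     length = len(nodes)
--     i=0
--     while i<(length-1):
--         lists.append( (nodes[i],nodes[(i+1)]) )
--         i=i+1
--     lists.append( (nodes[i],nodes[0]) )
--     return lists
-- ===== SOURCE B (Python) =====
-- def create_tour(nodes):
--     succ = nodes[0]
--     out = []
--     for cur in reversed(nodes):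
--         out.append((cur, succ))
--         succ = cur
--     out.reverse()
--     return out
-- ===== Notes on version B (the rewrite author's own statement) =====
-- stated objective: alternative
-- what changed: Replaces A's forward index-counting while loop (per-step indexing and wraparound append) with a single reverse traversal that carries each node's successor in a variable, building the output back-to-front and reversing it once at the end (no per-element indexing).
import Mathlib
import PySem

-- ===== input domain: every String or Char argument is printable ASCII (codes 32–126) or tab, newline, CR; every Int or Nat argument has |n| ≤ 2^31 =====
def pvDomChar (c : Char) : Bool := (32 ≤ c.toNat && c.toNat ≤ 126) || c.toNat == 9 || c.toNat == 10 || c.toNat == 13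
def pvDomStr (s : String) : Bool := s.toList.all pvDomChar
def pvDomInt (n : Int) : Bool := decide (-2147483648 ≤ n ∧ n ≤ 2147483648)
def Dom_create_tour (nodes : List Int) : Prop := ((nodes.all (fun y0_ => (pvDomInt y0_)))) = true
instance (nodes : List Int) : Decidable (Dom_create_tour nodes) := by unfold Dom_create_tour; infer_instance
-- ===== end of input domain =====

-- B replaces A's forward index-counting while loop by a reverse traversal that carries each node's
-- successor, builds the output back-to-front and reverses it once at the end (objective: alternative).

-- ===== PORT A =====
-- the while loop: returns (lists, final i); pyGetD is safe here since Pre_ keeps every index in range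
def create_tour_loop (nodes : List Int) (len : Nat) (i : Nat)
    (lists : List (Int × Int)) : List (Int × Int) × Nat :=
  if _h : i < len - 1 then
    create_tour_loop nodes len (i + 1)
      (lists ++ [(PySem.List.pyGetD nodes (i : Int) 0, PySem.List.pyGetD nodes ((i : Int) + 1) 0)])
  else (lists, i)
termination_by len - 1 - i

def create_tour (nodes : List Int) : List (Int × Int) :=
  let length := nodes.length
  let (lists, i) := create_tour_loop nodes length 0 []
  lists ++ [(PySem.List.pyGetD nodes (i : Int) 0, PySem.List.pyGetD nodes 0 0)]

-- ===== PORT B =====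
-- the for-loop over reversed(nodes): state = (out, succ); pyGetD is safe since Pre_ gives nonempty
def create_tour_alt (nodes : List Int) : List (Int × Int) :=
  let succ := PySem.List.pyGetD nodes 0 0
  let st := nodes.reverse.foldl
    (fun (p : List (Int × Int) × Int) cur => (p.1 ++ [(cur, p.2)], cur)) ([], succ)
  st.1.reverse

-- ===== PRECONDITION & SPEC =====
-- Pre_ excludes only the empty list, on which the Python A raises IndexError (B raises there too).
def Pre_create_tour (nodes : List Int) : Prop := nodes ≠ []
instance (nodes : List Int) : Decidable (Pre_create_tour nodes) := by unfold Pre_create_tour; infer_instance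
def pvWitness_create_tour : List Int := ([1, 2, 3])

def Spec_create_tour (nodes : List Int) (out : List (Int × Int)) : Prop := out = create_tour_alt nodes
instance (nodes : List Int) (out : List (Int × Int)) : Decidable (Spec_create_tour nodes out) := by unfold Spec_create_tour; infer_instance

-- ===== CLAIM (what is proved, stated in full; the proofs are below) =====
def Claim_equal_create_tour : Prop := ∀ (nodes : List Int), Dom_create_tour nodes → Pre_create_tour nodes → Spec_create_tour nodes (create_tour nodes)

-- ===== LEMMAS AND PROOFS =====

-- loop invariant: starting at i < len, the loop appends the consecutive pairs from index i on
theorem create_tour_loop_eq (nodes : List Int) (i : Nat) (hi : i < nodes.length)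
    (lists : List (Int × Int)) :
    create_tour_loop nodes nodes.length i lists
      = (lists ++ (nodes.drop i).zip (nodes.drop (i + 1)), nodes.length - 1) := by
  by_cases h : i < nodes.length - 1
  · rw [create_tour_loop, dif_pos h, create_tour_loop_eq nodes (i + 1) (by omega)]
    have hd : nodes.drop i = nodes[i] :: nodes.drop (i + 1) := List.drop_eq_getElem_cons hi
    have hd' : nodes.drop (i + 1) = nodes[i + 1] :: nodes.drop (i + 2) :=
      List.drop_eq_getElem_cons (by omega)
    have g1 : PySem.List.pyGetD nodes (i : Int) 0 = nodes[i] := by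
      rw [PySem.List.pyGetD_natCast]
      exact List.getD_eq_getElem _ _ hi
    have g2 : PySem.List.pyGetD nodes ((i : Int) + 1) 0 = nodes[i + 1] := by
      have hc : ((i : Int) + 1) = ((i + 1 : Nat) : Int) := by push_cast; ring
      rw [hc, PySem.List.pyGetD_natCast]
      exact List.getD_eq_getElem _ _ (by omega)
    have hz : (nodes.drop i).zip (nodes.drop (i + 1))
        = (nodes[i], nodes[i + 1]) :: (nodes.drop (i + 1)).zip (nodes.drop (i + 2)) := by
      conv_lhs => rw [hd, hd']
      rw [List.zip_cons_cons, ← hd']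
    rw [hz, g1, g2]
    simp
  · have hie : i = nodes.length - 1 := by omega
    rw [create_tour_loop, dif_neg h]
    have : nodes.drop (i + 1) = [] := List.drop_eq_nil_of_le (by omega)
    simp [hie]
    omega
termination_by nodes.length - 1 - i

-- the reverse-pass fold pairs each element with the state (its predecessor in the traversal)
theorem create_tour_fold_eq (m : List Int) (acc : List (Int × Int)) (s : Int) :
    (m.foldl (fun (p : List (Int × Int) × Int) cur => (p.1 ++ [(cur, p.2)], cur)) (acc, s)).1
      = acc ++ m.zip (s :: m) := by
  induction m generalizing acc s with
  | nil => simp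
  | cons c rest ih =>
    simp only [List.foldl_cons, ih, List.zip_cons_cons, List.append_assoc, List.singleton_append]

-- reversing the reverse-pass pairs yields the zip of the list with its rotation
theorem rev_zip_eq (l : List Int) (x : Int) :
    ((l.reverse.zip (x :: l.reverse)).reverse) = l.zip (l.tail ++ [x]) := by
  induction l using List.reverseRecOn generalizing x with
  | nil => simp
  | append_singleton l' b ih =>
    rw [List.reverse_append, List.reverse_singleton, List.singleton_append,
      List.zip_cons_cons, List.reverse_cons, ih b]
    cases l' with
    | nil => simp
    | cons c l'' =>
      have hlen : (c :: l'').length = (l'' ++ [b]).length := by simp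
      simp only [List.tail_cons, List.cons_append]
      rw [show (c :: (l'' ++ [b]) : List Int) = (c :: l'') ++ [b] from rfl,
        List.zip_append hlen]
      simp

-- B's zip against the rotated list splits into consecutive pairs plus the wraparound pair
theorem zip_rotate (a : Int) (t : List Int) (x : Int) :
    (a :: t).zip (t ++ [x]) = (a :: t).zip t ++ [((a :: t).getLast (by simp), x)] := by
  induction t generalizing a with
  | nil => simp
  | cons b t' ih =>
    simp only [List.cons_append, List.zip_cons_cons]
    rw [ih b]
    simp

theorem create_tour_spec : Claim_equal_create_tour := by
  intro nodes _ hpre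
  unfold Spec_create_tour create_tour create_tour_alt
  match nodes, hpre with
  | a :: t, _ =>
    show (match create_tour_loop (a :: t) (a :: t).length 0 [] with
      | (lists, i) => lists ++ [(PySem.List.pyGetD (a :: t) (↑i) 0, PySem.List.pyGetD (a :: t) 0 0)])
      = (((a :: t).reverse.foldl
          (fun (p : List (Int × Int) × Int) cur => (p.1 ++ [(cur, p.2)], cur))
          ([], PySem.List.pyGetD (a :: t) 0 0)).1).reverse
    rw [create_tour_loop_eq (a :: t) 0 (by simp)]
    simp only [List.nil_append, List.drop_zero]
    have h0 : PySem.List.pyGetD (a :: t) 0 0 = a := by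
      simp [PySem.List.pyGetD]
    rw [create_tour_fold_eq, List.nil_append, h0, rev_zip_eq, List.tail_cons,
      zip_rotate a t a]
    have hlast : PySem.List.pyGetD (a :: t) (((a :: t).length - 1 : Nat) : Int) 0
        = (a :: t).getLast (by simp) := by
      rw [PySem.List.pyGetD_natCast, List.getLast_eq_getElem]
      exact List.getD_eq_getElem _ _ (by simp)
    rw [hlast]
    simp
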